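-- pv_equiv track=rewrite | github.com/p-ortega/rtm-tutorial | herebedragons.py | create_output_pairs
-- ===== SOURCE A (Python) =====
-- def create_output_pairs(perioddata, output_interval=5):
--     pairs = []
--     cumulative_day = 0
--     next_output_day = 0
--
--     for kper, (perlen, nstp, tsmult) in enumerate(perioddata):
--         period_days = int(perlen)
--
--         # Check each day in this stress period
--         for day_in_period in range(period_days):
--             if cumulative_day == next_output_day:
--                 pairs.append((kper+1, day_in_period+1))
--                 next_output_day += output_interval
--
--             cumulative_day += 1
--
--     return pairs
-- ===== SOURCE B (Python) =====
-- def create_output_pairs(perioddata, output_interval=5):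
--     # Steps directly between output-aligned global days instead of scanning every day.
--     pairs = []
--     start = 0
--     for kper, (perlen, nstp, tsmult) in enumerate(perioddata, 1):
--         n = int(perlen)
--         if n > 0:
--             end = start + n
--             first = -(-start // output_interval) * output_interval
--             for d in range(first, end, output_interval):
--                 pairs.append((kper, d - start + 1))
--             start = end
--     return pairs
-- ===== Notes on version B (the rewrite author's own statement) =====
-- stated objective: faster
-- what changed: B loops only over the output-aligned days of each period (first aligned day by ceiling division, then stepping by output_interval) instead of scanning every single day and comparing counters.
-- outside the precondition, e.g. on create_output_pairs([(3, 1, 1)], 0): A returns [(1, 1)], B raises ZeroDivisionError; on create_output_pairs([(3, 1, 1)], -2): A returns [(1, 1)], B returns []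
import Mathlib
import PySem

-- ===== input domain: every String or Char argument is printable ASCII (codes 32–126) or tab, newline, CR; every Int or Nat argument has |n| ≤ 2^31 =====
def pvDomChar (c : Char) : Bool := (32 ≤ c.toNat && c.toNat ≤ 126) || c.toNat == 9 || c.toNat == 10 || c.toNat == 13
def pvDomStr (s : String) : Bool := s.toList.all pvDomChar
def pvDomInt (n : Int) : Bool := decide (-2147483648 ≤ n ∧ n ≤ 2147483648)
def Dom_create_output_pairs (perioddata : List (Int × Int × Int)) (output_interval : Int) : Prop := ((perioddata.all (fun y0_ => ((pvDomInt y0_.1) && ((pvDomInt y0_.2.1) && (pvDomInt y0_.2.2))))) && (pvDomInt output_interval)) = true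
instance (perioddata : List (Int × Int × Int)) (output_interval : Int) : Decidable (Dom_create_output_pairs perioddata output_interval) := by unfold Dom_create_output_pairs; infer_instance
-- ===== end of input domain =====

-- B replaces A's day-by-day scan by stepping directly between output-aligned days (faster: work
-- proportional to emitted pairs + periods, not to total days).

-- ===== PORT A =====
def create_output_pairs (perioddata : List (Int × Int × Int)) (output_interval : Int) : List (Int × Int) :=
  -- pairs = [], cumulative_day = 0, next_output_day = 0; state = (pairs, cumulative_day, next_output_day)
  let r := (PySem.List.enumerate perioddata).foldl
    (fun (st : List (Int × Int) × Int × Int) (kpe : Int × (Int × Int × Int)) =>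
      -- period_days = int(perlen) = kpe.2.1 (already an int)
      (PySem.List.pyRange 0 kpe.2.1 1).foldl
        (fun (st : List (Int × Int) × Int × Int) (day : Int) =>
          if st.2.1 = st.2.2 then
            (st.1 ++ [(kpe.1 + 1, day + 1)], st.2.1 + 1, st.2.2 + output_interval)
          else
            (st.1, st.2.1 + 1, st.2.2)) st)
    ([], 0, 0)
  r.1

-- ===== PORT B =====
def create_output_pairs_alt (perioddata : List (Int × Int × Int)) (output_interval : Int) : List (Int × Int) :=
  -- state = (pairs, start)
  let r := (PySem.List.enumerate perioddata 1).foldl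
    (fun (st : List (Int × Int) × Int) (kpe : Int × (Int × Int × Int)) =>
      if 0 < kpe.2.1 then
        let start := st.2
        let e := start + kpe.2.1
        let first := -(PySem.Int.floordiv (-start) output_interval) * output_interval
        ((PySem.List.pyRange first e output_interval).foldl
          (fun ps d => ps ++ [(kpe.1, d - start + 1)]) st.1, e)
      else st)
    ([], 0)
  r.1

-- ===== PRECONDITION & SPEC =====
-- Pre_ excludes non-positive output_interval, outside the function's natural domain: there A's
-- counter matches only global day 0 (it emits a single pair and then never outputs again, an
-- artefact of the counter arithmetic), while B's range stepping raises ZeroDivisionError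
-- (interval 0) or emits nothing (negative interval).
def Pre_create_output_pairs (perioddata : List (Int × Int × Int)) (output_interval : Int) : Prop :=
  1 ≤ output_interval
instance (perioddata : List (Int × Int × Int)) (output_interval : Int) : Decidable (Pre_create_output_pairs perioddata output_interval) := by unfold Pre_create_output_pairs; infer_instance

def pvWitness_create_output_pairs : (List (Int × Int × Int)) × Int := ([(3, 1, 1), (4, 2, 1)], 2)

def Spec_create_output_pairs (perioddata : List (Int × Int × Int)) (output_interval : Int) (out : List (Int × Int)) : Prop := out = create_output_pairs_alt perioddata output_interval
instance (perioddata : List (Int × Int × Int)) (output_interval : Int) (out : List (Int × Int)) : Decidable (Spec_create_output_pairs perioddata output_interval out) := by unfold Spec_create_output_pairs; infer_instance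

-- ===== CLAIM (what is proved, stated in full; the proofs are below) =====
def Claim_equal_create_output_pairs : Prop := ∀ (perioddata : List (Int × Int × Int)) (output_interval : Int), Dom_create_output_pairs perioddata output_interval → Pre_create_output_pairs perioddata output_interval → Spec_create_output_pairs perioddata output_interval (create_output_pairs perioddata output_interval)

-- ===== LEMMAS AND PROOFS =====

def pvCeil (oi c : Int) : Int := -(PySem.Int.floordiv (-c) oi) * oi

theorem pvCeil_bounds (oi c : Int) (hoi : 0 < oi) :
    c ≤ pvCeil oi c ∧ pvCeil oi c < c + oi ∧ oi ∣ pvCeil oi c := by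
  have h := (PySem.Int.neg_floordiv_neg_eq_iff_of_pos (a := c) (b := oi)
    (q := -(PySem.Int.floordiv (-c) oi)) hoi).mp rfl
  refine ⟨h.2, ?_, ⟨-(PySem.Int.floordiv (-c) oi), mul_comm _ _⟩⟩
  unfold pvCeil
  nlinarith [h.1]

theorem pvCeil_eq_of (oi c x : Int) (hoi : 0 < oi) (hd : oi ∣ x) (h1 : c ≤ x) (h2 : x < c + oi) :
    pvCeil oi c = x := by
  obtain ⟨hb1, hb2, hb3⟩ := pvCeil_bounds oi c hoi
  have hdd : oi ∣ (x - pvCeil oi c) := hd.sub hb3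
  have : x - pvCeil oi c = 0 := by
    have habs : |x - pvCeil oi c| < oi := by rw [abs_lt]; omega
    exact Int.eq_zero_of_abs_lt_dvd hdd habs
  omega

theorem pvCeil_le_of (oi c x : Int) (hoi : 0 < oi) (hd : oi ∣ x) (h1 : c ≤ x) :
    pvCeil oi c ≤ x := by
  obtain ⟨hb1, hb2, hb3⟩ := pvCeil_bounds oi c hoi
  by_contra hlt
  rw [not_le] at hlt
  have hdd : oi ∣ (pvCeil oi c - x) := hb3.sub hd
  have : pvCeil oi c - x = 0 := by
    have habs : |pvCeil oi c - x| < oi := by rw [abs_lt]; omega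
    exact Int.eq_zero_of_abs_lt_dvd hdd habs
  omega

theorem pyRange_pos_succ_right (a b s : Int) (hs : 0 < s) :
    PySem.List.pyRange a (b + 1) s =
      PySem.List.pyRange a b s ++ (if a ≤ b ∧ s ∣ (b - a) then [b] else []) := by
  rw [PySem.List.pyRange_of_pos a (b+1) hs, PySem.List.pyRange_of_pos a b hs]
  rcases lt_trichotomy a b with hab | hab | hab
  · rw [if_pos (show a < b + 1 by omega), if_pos hab]
    by_cases hd : s ∣ (b - a)
    · obtain ⟨q, hq⟩ := hd
      have hq0 : 0 ≤ q := by nlinarith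
      have e2 : ((b + 1 - a + s - 1) / s) = q + 1 := by
        rw [show b + 1 - a + s - 1 = (q + 1) * s by rw [mul_comm]; linarith [hq],
          Int.mul_ediv_cancel _ (by omega)]
      have e4 : ((b - a + s - 1) / s) = q := by
        rw [show b - a + s - 1 = (s - 1) + q * s by rw [mul_comm]; linarith [hq],
          Int.add_mul_ediv_right _ _ (by omega : s ≠ 0),
          Int.ediv_eq_zero_of_lt (by omega) (by omega)]
        ring
      rw [e2, e4, show (q + 1).toNat = q.toNat + 1 by omega, List.range_succ, List.map_append,
        if_pos ⟨le_of_lt hab, ⟨q, hq⟩⟩]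
      simp
      rw [max_eq_left hq0]
      linarith [hq]
    · have hq := Int.mul_ediv_add_emod (b - a) s
      set q := (b - a) / s with hqdef
      set r := (b - a) % s with hrdef
      have hr0 : 0 ≤ r := Int.emod_nonneg _ (by omega)
      have hrs : r < s := Int.emod_lt_of_pos _ hs
      have hrne : r ≠ 0 := fun h0 => hd (Int.dvd_of_emod_eq_zero h0)
      have e2 : ((b + 1 - a + s - 1) / s) = q + 1 := by
        rw [show b + 1 - a + s - 1 = r + (q + 1) * s by linarith [hq],
          Int.add_mul_ediv_right _ _ (by omega : s ≠ 0),
          Int.ediv_eq_zero_of_lt hr0 hrs]; ring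
      have e4 : ((b - a + s - 1) / s) = q + 1 := by
        rw [show b - a + s - 1 = (r - 1) + (q + 1) * s by linarith [hq],
          Int.add_mul_ediv_right _ _ (by omega : s ≠ 0),
          Int.ediv_eq_zero_of_lt (by omega) (by omega)]; ring
      rw [e2, e4, if_neg (fun h => hd h.2), List.append_nil]
  · subst hab
    rw [if_pos (show a < a + 1 by omega), if_neg (lt_irrefl a),
      show a + 1 - a + s - 1 = s by ring, Int.ediv_self (by omega : s ≠ 0),
      if_pos ⟨le_refl a, by simp⟩]
    simp
  · rw [if_neg (show ¬ a < b + 1 by omega), if_neg (show ¬ a < b by omega),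
      if_neg (show ¬ (a ≤ b ∧ s ∣ (b - a)) by intro h; omega)]
    simp

theorem innerA_spec (oi kp : Int) (hoi : 0 < oi) (n : Nat) (cum : Int) (pairs : List (Int × Int)) :
    (PySem.List.pyRange 0 (n : Int) 1).foldl
      (fun (st : List (Int × Int) × Int × Int) (day : Int) =>
        if st.2.1 = st.2.2 then (st.1 ++ [(kp, day + 1)], st.2.1 + 1, st.2.2 + oi)
        else (st.1, st.2.1 + 1, st.2.2)) (pairs, cum, pvCeil oi cum)
    = (pairs ++ (PySem.List.pyRange (pvCeil oi cum) (cum + n) oi).map (fun d => (kp, d - cum + 1)),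
       cum + n, pvCeil oi (cum + n)) := by
  induction n with
  | zero =>
    have hb := pvCeil_bounds oi cum hoi
    have h1 : PySem.List.pyRange 0 ((0:Nat):Int) 1 = [] :=
      PySem.List.pyRange_one_eq_nil (by simp)
    have h2 : PySem.List.pyRange (pvCeil oi cum) (cum + ((0:Nat):Int)) oi = [] := by
      rw [PySem.List.pyRange_of_pos _ _ hoi,
        if_neg (show ¬ pvCeil oi cum < cum + ((0:Nat):Int) by push_cast; omega)]
      simp
    rw [h1, h2]
    simp
  | succ n ih =>
    have hcast : ((n + 1 : Nat) : Int) = (n : Int) + 1 := by push_cast; ring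
    rw [hcast, PySem.List.pyRange_one_succ_right (by positivity), List.foldl_append, ih,
      List.foldl_cons, List.foldl_nil,
      show cum + ((n:Int) + 1) = cum + (n:Int) + 1 from by ring]
    have hb := pvCeil_bounds oi (cum + (n:Int)) hoi
    have hbc := pvCeil_bounds oi cum hoi
    by_cases hd : oi ∣ (cum + (n:Int))
    · have hceq : pvCeil oi (cum + (n:Int)) = cum + (n:Int) :=
        pvCeil_eq_of oi _ _ hoi hd le_rfl (by omega)
      rw [if_pos (by simpa using hceq.symm)]
      have hle : pvCeil oi cum ≤ cum + (n:Int) := pvCeil_le_of oi _ _ hoi hd (by omega)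
      have hr : PySem.List.pyRange (pvCeil oi cum) (cum + (n:Int) + 1) oi
          = PySem.List.pyRange (pvCeil oi cum) (cum + (n:Int)) oi ++ [cum + (n:Int)] := by
        rw [pyRange_pos_succ_right _ _ _ hoi, if_pos ⟨hle, hd.sub hbc.2.2⟩]
      have hnext : pvCeil oi (cum + (n:Int) + 1) = pvCeil oi (cum + (n:Int)) + oi := by
        rw [hceq]
        exact pvCeil_eq_of oi _ _ hoi (Dvd.dvd.add hd ⟨1, by ring⟩) (by omega) (by omega)
      rw [hr, hnext, List.map_append]
      simp
    · have hne : pvCeil oi (cum + (n:Int)) ≠ cum + (n:Int) := by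
        intro h; exact hd (h ▸ hb.2.2)
      rw [if_neg (by simpa using fun h => hne h.symm)]
      have hr : PySem.List.pyRange (pvCeil oi cum) (cum + (n:Int) + 1) oi
          = PySem.List.pyRange (pvCeil oi cum) (cum + (n:Int)) oi := by
        rw [pyRange_pos_succ_right _ _ _ hoi,
          if_neg (fun h => hd (by simpa using h.2.add hbc.2.2)), List.append_nil]
      have hnext : pvCeil oi (cum + (n:Int) + 1) = pvCeil oi (cum + (n:Int)) :=
        pvCeil_eq_of oi _ _ hoi hb.2.2 (by omega) (by omega)
      rw [hr, hnext]

def fA (oi : Int) : (List (Int × Int) × Int × Int) → (Int × (Int × Int × Int)) → (List (Int × Int) × Int × Int) :=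
  fun st kpe =>
    (PySem.List.pyRange 0 kpe.2.1 1).foldl
      (fun (st : List (Int × Int) × Int × Int) (day : Int) =>
        if st.2.1 = st.2.2 then
          (st.1 ++ [(kpe.1 + 1, day + 1)], st.2.1 + 1, st.2.2 + oi)
        else
          (st.1, st.2.1 + 1, st.2.2)) st

def fB (oi : Int) : (List (Int × Int) × Int) → (Int × (Int × Int × Int)) → (List (Int × Int) × Int) :=
  fun st kpe =>
    if 0 < kpe.2.1 then
      let start := st.2
      let e := start + kpe.2.1
      let first := -(PySem.Int.floordiv (-start) oi) * oi
      ((PySem.List.pyRange first e oi).foldl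
        (fun ps d => ps ++ [(kpe.1, d - start + 1)]) st.1, e)
    else st

theorem foldl_append_map {α β : Type} (l : List α) (g : α → β) :
    ∀ (ps : List β), l.foldl (fun ps d => ps ++ [g d]) ps = ps ++ l.map g := by
  induction l with
  | nil => intro ps; simp
  | cons x xs ih => intro ps; simp [ih]

theorem outer_spec (oi : Int) (hoi : 0 < oi) (pd : List (Int × Int × Int)) :
    ∀ (k cum : Int) (pairs : List (Int × Int)),
    (PySem.List.enumerate pd k).foldl (fA oi) (pairs, cum, pvCeil oi cum)
    = (((PySem.List.enumerate pd (k + 1)).foldl (fB oi) (pairs, cum)).1,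
       ((PySem.List.enumerate pd (k + 1)).foldl (fB oi) (pairs, cum)).2,
       pvCeil oi ((PySem.List.enumerate pd (k + 1)).foldl (fB oi) (pairs, cum)).2) := by
  induction pd with
  | nil => intro k cum pairs; simp [PySem.List.enumerate_nil]
  | cons x rest ih =>
    intro k cum pairs
    rw [PySem.List.enumerate_cons, PySem.List.enumerate_cons, List.foldl_cons, List.foldl_cons]
    by_cases hx : 0 < x.1
    · have hA : fA oi (pairs, cum, pvCeil oi cum) (k, x)
          = (pairs ++ (PySem.List.pyRange (pvCeil oi cum) (cum + x.1) oi).map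
              (fun d => (k + 1, d - cum + 1)), cum + x.1, pvCeil oi (cum + x.1)) := by
        unfold fA
        rw [show PySem.List.pyRange 0 x.1 1 = PySem.List.pyRange 0 ((x.1.toNat : Nat) : Int) 1 from
            by rw [Int.toNat_of_nonneg (le_of_lt hx)],
          innerA_spec oi (k + 1) hoi x.1.toNat cum pairs,
          Int.toNat_of_nonneg (le_of_lt hx)]
      have hB : fB oi (pairs, cum) (k + 1, x)
          = (pairs ++ (PySem.List.pyRange (pvCeil oi cum) (cum + x.1) oi).map
              (fun d => (k + 1, d - cum + 1)), cum + x.1) := by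
        unfold fB
        rw [if_pos (show 0 < ((k + 1, x) : Int × (Int × Int × Int)).2.1 from hx)]
        show (List.foldl (fun ps d => ps ++ [(k + 1, d - cum + 1)]) pairs
            (PySem.List.pyRange (-(PySem.Int.floordiv (-cum) oi) * oi) (cum + x.1) oi),
          cum + x.1) = _
        rw [show -(PySem.Int.floordiv (-cum) oi) * oi = pvCeil oi cum from rfl,
          foldl_append_map (PySem.List.pyRange (pvCeil oi cum) (cum + x.1) oi)
            (fun d => (k + 1, d - cum + 1)) pairs]
      rw [hA, hB]
      exact ih (k + 1) (cum + x.1) _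
    · have hA : fA oi (pairs, cum, pvCeil oi cum) (k, x) = (pairs, cum, pvCeil oi cum) := by
        unfold fA
        rw [show ((k, x) : Int × (Int × Int × Int)).2.1 = x.1 from rfl,
          PySem.List.pyRange_one_eq_nil (by omega), List.foldl_nil]
      have hB : fB oi (pairs, cum) (k + 1, x) = (pairs, cum) := by
        unfold fB
        simp [hx]
      rw [hA, hB]
      exact ih (k + 1) cum pairs

-- ===== VERDICT (by name: the statement is the Claim_ definition above) =====
theorem create_output_pairs_spec : Claim_equal_create_output_pairs := by
  intro pd oi _hdom hpre
  have hoi : 0 < oi := hpre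
  unfold Spec_create_output_pairs create_output_pairs create_output_pairs_alt
  show ((PySem.List.enumerate pd 0).foldl (fA oi) ([], 0, 0)).1
     = ((PySem.List.enumerate pd 1).foldl (fB oi) ([], 0)).1
  have h0 : pvCeil oi 0 = 0 := pvCeil_eq_of oi 0 0 hoi ⟨0, by ring⟩ le_rfl (by omega)
  rw [show (([], 0, 0) : List (Int × Int) × Int × Int) = (([], 0, pvCeil oi 0)) from by rw [h0]]
  rw [outer_spec oi hoi pd 0 0 []]
  norm_num
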